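-- pv_equiv track=rewrite | github.com/OrezriceWasHere/NERZO | evaluate_with_extraction/extracting/extracting_entities_fewnerd.py | gold_spans
-- ===== SOURCE A (Python) =====
-- from typing import Dict, List, Set, Tuple
--
-- def gold_spans(
--     tokens: List[str],
--     ner_tags: List[int],
--     fine_tags: List[int],
--     fine_id2lab: List[str] | None = None,
-- ) -> Tuple[List[Dict[str, str]], Set[str]]:
--     """
--     Few-NERD marks every entity token with a single, non-zero tag id.
--     A contiguous run of the SAME id = one mention.
--
--     Returns
--     -------
--     gold_list : [{'text': 'Little Chef', 'fine_type': 'organization_restaurant'}, …]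
--     gold_set  : {'Little Chef', …}   # for span-level metrics
--     """
--     spans: List[Dict[str, str]] = []
--     current: List[str] = []
--     cur_fine = 0
--     prev_tag = 0
--
--     def flush():
--         if current:
--             spans.append(
--                 {
--                     "text": " ".join(current),
--                     "fine_type": fine_id2lab[cur_fine] if fine_id2lab else cur_fine,
--                 }
--             )
--
--     for w, t, ft in zip(tokens, ner_tags, fine_tags):
--         if t:                              # inside entity
--             if t == prev_tag:
--                 current.append(w)
--             else:
--                 flush()
--                 current, cur_fine = [w], ft
--             prev_tag = t
--         else:                              # outside
--             flush()
--             current, prev_tag = [], 0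
--     flush()
--     return spans, {d["text"] for d in spans}
-- ===== SOURCE B (Python) =====
-- from typing import Dict, List, Set, Tuple
--
--
-- def gold_spans(
--     tokens: List[str],
--     ner_tags: List[int],
--     fine_tags: List[int],
--     fine_id2lab: List[str] | None = None,
-- ) -> Tuple[List[Dict[str, str]], Set[str]]:
--     """Span-at-a-time: peel one whole contiguous same-tag run per step
--     instead of a token-at-a-time accumulator state machine."""
--     gold_list: List[Dict[str, str]] = []
--     triples = list(zip(tokens, ner_tags, fine_tags))
--     while triples:
--         w, t, ft = triples[0]
--         rest = triples[1:]
--         if t == 0: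
--             triples = rest
--             continue
--         k = 0
--         while k < len(rest) and rest[k][1] == t:
--             k += 1
--         gold_list.append(
--             {
--                 "text": " ".join([w] + [x[0] for x in rest[:k]]),
--                 "fine_type": fine_id2lab[ft] if fine_id2lab else ft,
--             }
--         )
--         triples = rest[k:]
--     return gold_list, {d["text"] for d in gold_list}
-- ===== Notes on version B (the rewrite author's own statement) =====
-- stated objective: alternative
-- what changed: Replaced A's token-at-a-time state machine (prev_tag/current/cur_fine accumulators with a flush closure) by a span-at-a-time scan that peels one whole contiguous same-tag run per iteration (count the run prefix, slice it off), building each entity dict directly from the run.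
import Mathlib
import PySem

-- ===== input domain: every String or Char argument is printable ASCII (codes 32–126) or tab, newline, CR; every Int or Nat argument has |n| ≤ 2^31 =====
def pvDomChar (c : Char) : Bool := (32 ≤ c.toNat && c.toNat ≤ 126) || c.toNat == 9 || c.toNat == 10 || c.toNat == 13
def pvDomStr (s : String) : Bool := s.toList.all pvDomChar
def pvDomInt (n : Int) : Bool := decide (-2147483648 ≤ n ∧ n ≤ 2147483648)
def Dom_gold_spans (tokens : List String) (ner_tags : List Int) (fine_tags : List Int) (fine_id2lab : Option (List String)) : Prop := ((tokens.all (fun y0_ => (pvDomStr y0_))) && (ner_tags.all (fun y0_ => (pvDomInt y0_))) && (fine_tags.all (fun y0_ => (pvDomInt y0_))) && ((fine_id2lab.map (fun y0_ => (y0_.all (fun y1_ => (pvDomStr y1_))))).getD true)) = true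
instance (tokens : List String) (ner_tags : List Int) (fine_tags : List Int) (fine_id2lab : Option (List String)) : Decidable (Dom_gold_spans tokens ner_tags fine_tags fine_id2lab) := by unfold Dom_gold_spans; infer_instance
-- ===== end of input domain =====

-- B peels one whole contiguous same-tag run per step (count-prefix + slice) instead of A's
-- token-at-a-time prev_tag/current/flush state machine; same cost, different decomposition.


-- ===== PORT A =====
-- `fine_id2lab[ft] if fine_id2lab else ft`, shared by both ports (both Pythons contain this
-- exact expression).  Under Pre_ the list is present and the index in range, so the `.getD ""`
-- defaults are never reached (outside Pre_ Python raises IndexError or yields an int, no String).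
def pvFineLabel (fid : Option (List String)) (ft : Int) : String :=
  match fid with
  | some labs => if labs ≠ [] then (PySem.List.pyGet? labs ft).getD "" else ""
  | none => ""

-- the `flush()` closure of A
def pvFlush (fid : Option (List String)) (spans : List (List (String × String)))
    (current : List String) (cur_fine : Int) : List (List (String × String)) :=
  if current ≠ [] then
    spans ++ [[("text", PySem.Str.join " " current), ("fine_type", pvFineLabel fid cur_fine)]]
  else spans

-- A's for-loop over zip(tokens, ner_tags, fine_tags), state (spans, current, cur_fine, prev_tag)
def pvLoopA (fid : Option (List String)) :
    List (String × Int × Int) → List (List (String × String)) → List String → Int → Int →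
    List (List (String × String)) × List String × Int
  | [], spans, current, cur_fine, _ => (spans, current, cur_fine)
  | (w, t, ft) :: rest, spans, current, cur_fine, prev_tag =>
    if t ≠ 0 then
      if t = prev_tag then pvLoopA fid rest spans (current ++ [w]) cur_fine t
      else pvLoopA fid rest (pvFlush fid spans current cur_fine) [w] ft t
    else pvLoopA fid rest (pvFlush fid spans current cur_fine) [] cur_fine 0

def gold_spans (tokens : List String) (ner_tags : List Int) (fine_tags : List Int) (fine_id2lab : Option (List String)) : (List (List (String × String))) × List String :=
  let st := pvLoopA fine_id2lab (tokens.zip (ner_tags.zip fine_tags)) [] [] 0 0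
  let spans := pvFlush fine_id2lab st.1 st.2.1 st.2.2
  (spans, PySem.Set.ofList (spans.map (fun d => (PySem.Dict.mk d).getD "text" "")))

-- ===== PORT B =====
-- B's while-loop: peel the leading same-tag run (takeWhile/dropWhile = B's count-k + slices)
def pvSpansB (fid : Option (List String)) : List (String × Int × Int) → List (List (String × String))
  | [] => []
  | (w, t, ft) :: rest =>
    if t = 0 then pvSpansB fid rest
    else
      [("text", PySem.Str.join " " (w :: (rest.takeWhile (fun x => x.2.1 == t)).map (·.1))),
       ("fine_type", pvFineLabel fid ft)]
        :: pvSpansB fid (rest.dropWhile (fun x => x.2.1 == t))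
  termination_by l => l.length
  decreasing_by
    · simp
    · exact Nat.lt_succ_of_le (List.length_dropWhile_le _ _)

def gold_spans_alt (tokens : List String) (ner_tags : List Int) (fine_tags : List Int) (fine_id2lab : Option (List String)) : (List (List (String × String))) × List String :=
  let gold_list := pvSpansB fine_id2lab (tokens.zip (ner_tags.zip fine_tags))
  (gold_list, PySem.Set.ofList (gold_list.map (fun d => (PySem.Dict.mk d).getD "text" "")))

-- ===== PRECONDITION & SPEC =====
-- Pre_ excludes exactly the inputs where A's result is not a value of the declared type or raises:
-- at the first token of any entity run, `fine_id2lab[ft]` must be a real label — if fine_id2lab is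
-- None or [] Python returns an int fine_type (unportable as String), and an out-of-range ft raises
-- IndexError (negative in-range ft wraps Python-style and stays inside Pre_).
def Pre_gold_spans (tokens : List String) (ner_tags : List Int) (fine_tags : List Int) (fine_id2lab : Option (List String)) : Prop :=
  ∀ i, i < min tokens.length (min ner_tags.length fine_tags.length) →
    (ner_tags.getD i 0 ≠ 0 ∧ (i = 0 ∨ ner_tags.getD (i - 1) 0 ≠ ner_tags.getD i 0)) →
    fine_id2lab ≠ none ∧ PySem.Raise.InRange (fine_id2lab.getD []).length (fine_tags.getD i 0)
instance (tokens : List String) (ner_tags : List Int) (fine_tags : List Int) (fine_id2lab : Option (List String)) : Decidable (Pre_gold_spans tokens ner_tags fine_tags fine_id2lab) := by unfold Pre_gold_spans; infer_instance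

def pvWitness_gold_spans : List String × List Int × List Int × Option (List String) :=
  (["Little", "Chef", "ate"], [3, 3, 0], [1, 1, 0], some ["person", "org"])

def Spec_gold_spans (tokens : List String) (ner_tags : List Int) (fine_tags : List Int) (fine_id2lab : Option (List String)) (out : (List (List (String × String))) × List String) : Prop := out = gold_spans_alt tokens ner_tags fine_tags fine_id2lab
instance (tokens : List String) (ner_tags : List Int) (fine_tags : List Int) (fine_id2lab : Option (List String)) (out : (List (List (String × String))) × List String) : Decidable (Spec_gold_spans tokens ner_tags fine_tags fine_id2lab out) := by unfold Spec_gold_spans; infer_instance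

-- ===== CLAIM (what is proved, stated in full; the proofs are below) =====
def Claim_equal_gold_spans : Prop := ∀ (tokens : List String) (ner_tags : List Int) (fine_tags : List Int) (fine_id2lab : Option (List String)), Dom_gold_spans tokens ner_tags fine_tags fine_id2lab → Pre_gold_spans tokens ner_tags fine_tags fine_id2lab → Spec_gold_spans tokens ner_tags fine_tags fine_id2lab (gold_spans tokens ner_tags fine_tags fine_id2lab)

-- ===== LEMMAS AND PROOFS =====

-- flush of the final state of A's loop
def pvFinal (fid : Option (List String)) (st : List (List (String × String)) × List String × Int) :
    List (List (String × String)) :=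
  pvFlush fid st.1 st.2.1 st.2.2

-- combined invariant: A's loop from the "outside an entity" state produces exactly B's spans
-- (first conjunct), and from "inside a run of tag t" it closes the run the way B's takeWhile/
-- dropWhile decomposition does (second conjunct)
theorem pvBridge (fid : Option (List String)) :
    ∀ n (l : List (String × Int × Int)), l.length ≤ n →
      ((∀ spans cf, pvFinal fid (pvLoopA fid l spans [] cf 0) = spans ++ pvSpansB fid l) ∧
       (∀ spans current t ft, t ≠ 0 → current ≠ [] →
         pvFinal fid (pvLoopA fid l spans current ft t) =
           spans ++
             ([("text", PySem.Str.join " " (current ++ (l.takeWhile (fun x => x.2.1 == t)).map (·.1))),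
               ("fine_type", pvFineLabel fid ft)]
               :: pvSpansB fid (l.dropWhile (fun x => x.2.1 == t))))) := by
  intro n
  induction n with
  | zero =>
    intro l hl
    have hnil : l = [] := List.eq_nil_of_length_eq_zero (Nat.le_zero.mp hl)
    subst hnil
    constructor
    · intro spans cf; simp [pvLoopA, pvFinal, pvFlush, pvSpansB]
    · intro spans current t ft ht hc
      simp [pvLoopA, pvFinal, pvFlush, pvSpansB, hc]
  | succ m ih =>
    intro l hl
    cases l with
    | nil =>
      constructor
      · intro spans cf; simp [pvLoopA, pvFinal, pvFlush, pvSpansB]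
      · intro spans current t ft ht hc
        simp [pvLoopA, pvFinal, pvFlush, pvSpansB, hc]
    | cons hd rest =>
      obtain ⟨w, t, ft⟩ := hd
      have hr : rest.length ≤ m := by simpa using Nat.le_of_succ_le_succ hl
      have IH := ih rest hr
      constructor
      · -- state: current = [], prev_tag = 0
        intro spans cf
        by_cases ht : t = 0
        · subst ht
          simp only [pvLoopA, pvSpansB]
          simp [pvFlush, IH.1 spans cf]
        · have h1 : pvLoopA fid ((w, t, ft) :: rest) spans [] cf 0 =
              pvLoopA fid rest (pvFlush fid spans [] cf) [w] ft t := by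
            simp [pvLoopA, ht]
          rw [h1]
          have h2 := IH.2 (pvFlush fid spans [] cf) [w] t ft ht (by simp)
          simp only [pvFlush, ne_eq, not_true_eq_false, if_false] at h2 ⊢
          simp at h2
          rw [h2]
          simp [pvSpansB, ht]
      · -- state: inside a run of tag t, current ≠ []
        intro spans current t0 ft0 ht0 hc
        by_cases ht : t = t0
        · subst ht
          have h1 : pvLoopA fid ((w, t, ft) :: rest) spans current ft0 t =
              pvLoopA fid rest spans (current ++ [w]) ft0 t := by
            simp [pvLoopA, ht0]
          rw [h1, IH.2 spans (current ++ [w]) t ft0 ht0 (by simp)]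
          simp [List.takeWhile, List.dropWhile]
        · by_cases hz : t = 0
          · subst hz
            have h1 : pvLoopA fid ((w, (0:Int), ft) :: rest) spans current ft0 t0 =
                pvLoopA fid rest (pvFlush fid spans current ft0) [] ft0 0 := by
              simp [pvLoopA]
            rw [h1, IH.1 (pvFlush fid spans current ft0) ft0]
            have hb : ((0:Int) == t0) = false := by simpa using fun h => ht0 h.symm
            have htw : ((w, (0:Int), ft) :: rest).takeWhile (fun x => x.2.1 == t0) = [] := by
              simp [List.takeWhile, hb]
            have hdw : ((w, (0:Int), ft) :: rest).dropWhile (fun x => x.2.1 == t0) =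
                (w, (0:Int), ft) :: rest := by
              simp [List.dropWhile, hb]
            rw [htw, hdw]
            simp [pvFlush, hc, pvSpansB]
          · have h1 : pvLoopA fid ((w, t, ft) :: rest) spans current ft0 t0 =
                pvLoopA fid rest (pvFlush fid spans current ft0) [w] ft t := by
              simp [pvLoopA, hz, ht]
            rw [h1, IH.2 (pvFlush fid spans current ft0) [w] t ft hz (by simp)]
            have hb : (t == t0) = false := by simpa using ht
            have htw : ((w, t, ft) :: rest).takeWhile (fun x => x.2.1 == t0) = [] := by
              simp [List.takeWhile, hb]
            have hdw : ((w, t, ft) :: rest).dropWhile (fun x => x.2.1 == t0) =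
                (w, t, ft) :: rest := by
              simp [List.dropWhile, hb]
            rw [htw, hdw]
            simp [pvFlush, hc, pvSpansB, hz]

theorem pvSpans_eq (tokens : List String) (ner_tags : List Int) (fine_tags : List Int)
    (fid : Option (List String)) :
    gold_spans tokens ner_tags fine_tags fid = gold_spans_alt tokens ner_tags fine_tags fid := by
  unfold gold_spans gold_spans_alt
  have h := (pvBridge fid (tokens.zip (ner_tags.zip fine_tags)).length
      (tokens.zip (ner_tags.zip fine_tags)) le_rfl).1 [] 0
  simp only [pvFinal] at h
  simp [h]

-- ===== VERDICT (by name: the statement is the Claim_ definition above) =====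
theorem gold_spans_spec : Claim_equal_gold_spans := by
  intro tokens ner_tags fine_tags fine_id2lab _ _
  unfold Spec_gold_spans
  exact pvSpans_eq tokens ner_tags fine_tags fine_id2lab
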